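-- pv_equiv track=rewrite | github.com/ajdunlap/scrabble-ai | checkwords.py | doTheseLettersFormAWord
-- ===== SOURCE A (Python) =====
-- alphabet = "ABCDEFGHIJKLMNOPQRSTUVWXYZ"
--
-- def doTheseLettersFormAWord(letters,words):
--     letters_sorted = sorted(letters)
--     if letters_sorted[1] == ".":
--         letterss = set()
--         for l1 in alphabet:
--             for l2 in alphabet:
--                 letterss.add(''.join(sorted([l1] + [l2] + letters_sorted[2:])))
--     elif letters_sorted[0] == ".":
--         letterss = set()
--         for l1 in alphabet:
--             letterss.add(''.join(sorted([l1] + letters_sorted[1:])))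
--     else:
--         letterss = [''.join(letters_sorted)]
--     return words.intersection(set(letterss))
-- ===== SOURCE B (Python) =====
-- alphabet = "ABCDEFGHIJKLMNOPQRSTUVWXYZ"
--
-- def _insert_sorted(c, fs):
--     # insert single-letter string c into sorted list fs, before equal elements
--     i = 0
--     while i < len(fs) and fs[i] < c:
--         i += 1
--     return fs[:i] + [c] + fs[i:]
--
-- def _common_prefix_len(u, v):
--     i = 0
--     while i < len(u) and i < len(v) and u[i] == v[i]:
--         i += 1
--     return i
--
-- def doTheseLettersFormAWord(letters, words):
--     ls = sorted(letters)
--     if ls[1] == ".":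
--         wild, fixed = 2, ls[2:]
--     elif ls[0] == ".":
--         wild, fixed = 1, ls[1:]
--     else:
--         wild, fixed = 0, ls
--     base = ''.join(fixed)
--     result = set()
--     for w in words:
--         if len(w) != len(base) + wild:
--             continue
--         cur, cand = base, fixed
--         ok = True
--         for _ in range(wild):
--             c = w[_common_prefix_len(w, cur)]
--             if c not in alphabet:
--                 ok = False
--                 break
--             cand = _insert_sorted(c, cand)
--             cur = ''.join(cand)
--         if ok and w == cur:
--             result.add(w)
--     return result
-- ===== Notes on version B (the rewrite author's own statement) =====
-- stated objective: alternative
-- what changed: Instead of materializing the set of all 26/676 alphabet fill-ins of the wildcards and intersecting it with the word set, B scans the words once and tests each word directly: a length check, then greedy extraction of each wildcard letter as the character at the first mismatch between the word and the joined fixed letters, followed by one ordered insertion and a final equality check.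
import Mathlib
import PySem

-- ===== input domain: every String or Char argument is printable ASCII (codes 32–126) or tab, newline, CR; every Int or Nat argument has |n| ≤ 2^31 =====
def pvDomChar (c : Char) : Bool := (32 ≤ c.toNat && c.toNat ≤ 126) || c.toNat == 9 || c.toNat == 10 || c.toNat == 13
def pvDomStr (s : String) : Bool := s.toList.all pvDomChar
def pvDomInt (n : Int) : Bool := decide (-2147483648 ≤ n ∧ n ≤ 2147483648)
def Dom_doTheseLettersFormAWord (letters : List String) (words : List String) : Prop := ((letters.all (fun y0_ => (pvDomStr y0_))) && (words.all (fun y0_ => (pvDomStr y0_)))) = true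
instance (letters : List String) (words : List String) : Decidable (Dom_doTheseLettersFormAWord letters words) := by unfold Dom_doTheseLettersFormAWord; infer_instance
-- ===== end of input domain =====

-- B scans the words once and tests each word by greedy wildcard-letter extraction (first-mismatch
-- position against the joined fixed letters) instead of materializing all 26/676 alphabet fill-ins
-- and intersecting (objective: alternative; return value only — neither program mutates its arguments).

-- ===== PORT A =====
def pvAlphabet : List String :=
  ["A","B","C","D","E","F","G","H","I","J","K","L","M",
   "N","O","P","Q","R","S","T","U","V","W","X","Y","Z"]

def doTheseLettersFormAWord (letters : List String) (words : List String) : List String :=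
  let letters_sorted := PySem.List.sorted letters (fun x => x)
  -- letters_sorted[1] / letters_sorted[0]: IndexError when letters has < 2 elements — excluded by Pre_
  if PySem.List.pyGetD letters_sorted 1 "" == "." then
    let letterss := pvAlphabet.foldl (fun s l1 =>
      pvAlphabet.foldl (fun s l2 =>
        PySem.Set.add s (PySem.Str.join ""
          (PySem.List.sorted ([l1] ++ [l2] ++ PySem.List.slice letters_sorted (some 2)) (fun x => x)))) s)
      PySem.Set.empty
    PySem.Set.inter words (PySem.Set.ofList letterss)
  else if PySem.List.pyGetD letters_sorted 0 "" == "." then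
    let letterss := pvAlphabet.foldl (fun s l1 =>
      PySem.Set.add s (PySem.Str.join ""
        (PySem.List.sorted ([l1] ++ PySem.List.slice letters_sorted (some 1)) (fun x => x))))
      PySem.Set.empty
    PySem.Set.inter words (PySem.Set.ofList letterss)
  else
    let letterss := [PySem.Str.join "" letters_sorted]
    PySem.Set.inter words (PySem.Set.ofList letterss)

-- ===== PORT B =====
def pvAlphabetChars : List Char :=
  ['A','B','C','D','E','F','G','H','I','J','K','L','M',
   'N','O','P','Q','R','S','T','U','V','W','X','Y','Z']

-- the `while i < len(fs) and fs[i] < c` index loop of _insert_sorted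
def pvInsPos (c : String) : List String → Nat
  | [] => 0
  | f :: fs => if f < c then pvInsPos c fs + 1 else 0

def pvInsertSorted (c : String) (fs : List String) : List String :=
  let i := pvInsPos c fs
  fs.take i ++ [c] ++ fs.drop i

-- the `while … u[i] == v[i]` loop of _common_prefix_len
def pvCpl : List Char → List Char → Nat
  | a :: u, b :: v => if a == b then pvCpl u v + 1 else 0
  | _, _ => 0

-- one iteration of the `for _ in range(wild)` loop; none = the `ok = False; break` state.
-- w[cpl] is always in range when this runs under the length guard (cpl ≤ len cur < len w),
-- so Python never raises here and the getD default is never read.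
def pvMatchStep (w : String) (st : Option (String × List String)) : Option (String × List String) :=
  match st with
  | none => none
  | some (cur, cand) =>
    let c := w.toList.getD (pvCpl w.toList cur.toList) 'A'
    if pvAlphabetChars.contains c then
      let cand' := pvInsertSorted (String.ofList [c]) cand
      some (PySem.Str.join "" cand', cand')
    else none

def doTheseLettersFormAWord_alt (letters : List String) (words : List String) : List String :=
  let ls := PySem.List.sorted letters (fun x => x)
  let wf : Int × List String :=
    if PySem.List.pyGetD ls 1 "" == "." then (2, PySem.List.slice ls (some 2))
    else if PySem.List.pyGetD ls 0 "" == "." then (1, PySem.List.slice ls (some 1))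
    else (0, ls)
  let base := PySem.Str.join "" wf.2
  words.foldl (fun result w =>
    if PySem.Str.len w != PySem.Str.len base + wf.1 then result
    else
      match (PySem.List.pyRange 0 wf.1 1).foldl (fun st _ => pvMatchStep w st) (some (base, wf.2)) with
      | none => result
      | some (cur, _) => if w == cur then PySem.Set.add result w else result)
    PySem.Set.empty

-- ===== PRECONDITION & SPEC =====
-- Pre_ excludes: letters with fewer than 2 elements, on which A raises IndexError at letters_sorted[1];
-- and words with duplicate entries, which do not represent a Python set (A's words argument is a set —
-- it calls words.intersection — so its List rendering holds distinct elements by the type convention).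
def Pre_doTheseLettersFormAWord (letters : List String) (words : List String) : Prop :=
  2 ≤ letters.length ∧ words.Nodup
instance (letters : List String) (words : List String) : Decidable (Pre_doTheseLettersFormAWord letters words) := by unfold Pre_doTheseLettersFormAWord; infer_instance

def pvWitness_doTheseLettersFormAWord : List String × List String := (["A", "B"], ["AB"])

def Spec_doTheseLettersFormAWord (letters : List String) (words : List String) (out : List String) : Prop := out = doTheseLettersFormAWord_alt letters words
instance (letters : List String) (words : List String) (out : List String) : Decidable (Spec_doTheseLettersFormAWord letters words out) := by unfold Spec_doTheseLettersFormAWord; infer_instance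

-- ===== CLAIM (what is proved, stated in full; the proofs are below) =====
def Claim_equal_doTheseLettersFormAWord : Prop := ∀ (letters : List String) (words : List String), Dom_doTheseLettersFormAWord letters words → Pre_doTheseLettersFormAWord letters words → Spec_doTheseLettersFormAWord letters words (doTheseLettersFormAWord letters words)

-- ===== LEMMAS AND PROOFS =====

-- chars of ''.join(fs); all string-level reasoning happens on List Char through this
def pvJ (fs : List String) : List Char := (fs.map String.toList).flatten

theorem pvChars_join_nil (l : List (List Char)) : PySem.Chars.join [] l = l.flatten := by
  induction l with
  | nil => rfl
  | cons x xs ih =>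
    cases xs with
    | nil => simp [PySem.Chars.join, List.intercalate]
    | cons y ys =>
      simp [PySem.Chars.join, List.intercalate] at *
      simpa using ih

theorem pvJoin_toList (fs : List String) : (PySem.Str.join "" fs).toList = pvJ fs := by
  show (String.ofList (PySem.Chars.join "".toList (fs.map String.toList))).toList = pvJ fs
  have h1 : ("" : String).toList = [] := rfl
  rw [h1, pvChars_join_nil]
  simp [pvJ]

theorem pvJ_append (xs ys : List String) : pvJ (xs ++ ys) = pvJ xs ++ pvJ ys := by
  simp [pvJ]

theorem pvJ_cons (s : String) (l : List String) : pvJ (s :: l) = s.toList ++ pvJ l := by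
  simp [pvJ]

-- ---- the common-prefix loop: position of a freshly inserted character ----

theorem pvCpl_append (p x y : List Char) : pvCpl (p ++ x) (p ++ y) = p.length + pvCpl x y := by
  induction p with
  | nil => simp
  | cons a p ih => simp [pvCpl, ih]; omega

theorem pvCpl_single (c : Char) (l : List Char) (d : Char) :
    (c :: l).getD (pvCpl (c :: l) l) d = c := by
  induction l with
  | nil => simp [pvCpl]
  | cons e t ih =>
    by_cases h : c = e
    · subst h
      simpa [pvCpl] using ih
    · simp [pvCpl, h]

theorem pvCpl_double : ∀ (n : Nat) (u v : List Char) (a b d : Char),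
    u.length + v.length ≤ n →
    (a :: (u ++ b :: v)).getD (pvCpl (a :: (u ++ b :: v)) (u ++ v)) d = a ∨
    (a :: (u ++ b :: v)).getD (pvCpl (a :: (u ++ b :: v)) (u ++ v)) d = b := by
  intro n
  induction n with
  | zero =>
    intro u v a b d h
    have hu : u = [] := by cases u <;> simp_all
    have hv : v = [] := by cases v <;> simp_all
    subst hu; subst hv
    simp [pvCpl]
  | succ n ih =>
    intro u v a b d h
    cases u with
    | nil =>
      cases v with
      | nil => simp [pvCpl]
      | cons e v' =>
        by_cases hae : a = e
        · subst hae
          have := ih [] v' b a d (by simp at h ⊢; omega)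
          simp only [List.nil_append] at this ⊢
          simp only [pvCpl, beq_self_eq_true]
          rcases this with h1 | h1
          · right; simpa [pvCpl] using h1
          · left; simpa [pvCpl] using h1
        · simp [pvCpl, hae]
    | cons y u' =>
      by_cases hay : a = y
      · subst hay
        have := ih u' v a b d (by simp at h ⊢; omega)
        simp only [List.cons_append, pvCpl, beq_self_eq_true] at this ⊢
        rcases this with h1 | h1
        · left; simpa using h1
        · right; simpa using h1
      · simp [pvCpl, hay]

-- ---- the insertion loop: structure of _insert_sorted ----

theorem pvIns_decomp (c : String) (fs : List String) :
    pvInsertSorted c fs = fs.takeWhile (fun f => f < c) ++ c :: fs.dropWhile (fun f => f < c) := by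
  induction fs with
  | nil => rfl
  | cons f fs ih =>
    simp only [pvInsertSorted] at ih ⊢
    by_cases h : f < c
    · have hd : (decide (f < c)) = true := by simp [h]
      simp only [pvInsPos, if_pos h, List.take_succ_cons, List.drop_succ_cons,
        List.takeWhile_cons, List.dropWhile_cons, hd, if_true, List.cons_append]
      exact congrArg (f :: ·) ih
    · have hd : (decide (f < c)) = false := by simp [h]
      simp only [pvInsPos, if_neg h, List.take_zero, List.drop_zero,
        List.takeWhile_cons, List.dropWhile_cons, hd, Bool.false_eq_true, if_false,
        List.nil_append, List.cons_append]

theorem pvIns_eq_orderedInsert (c : String) (fs : List String) :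
    pvInsertSorted c fs = List.orderedInsert (· ≤ ·) c fs := by
  induction fs with
  | nil => rfl
  | cons f fs ih =>
    simp only [pvInsertSorted] at ih ⊢
    by_cases h : f < c
    · have h2 : ¬ c ≤ f := not_le.mpr h
      simp only [pvInsPos, if_pos h, List.take_succ_cons, List.drop_succ_cons,
        List.orderedInsert, if_neg h2, List.cons_append]
      exact congrArg (f :: ·) ih
    · have h2 : c ≤ f := not_lt.mp h
      simp only [pvInsPos, if_neg h, List.take_zero, List.drop_zero,
        List.orderedInsert, if_pos h2, List.nil_append, List.cons_append]

theorem pvIns_perm (c : String) (fs : List String) : (pvInsertSorted c fs).Perm (c :: fs) := by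
  rw [pvIns_eq_orderedInsert]; exact List.perm_orderedInsert _ c fs

theorem pvIns_pairwise (c : String) (fs : List String) (h : fs.Pairwise (· ≤ ·)) :
    (pvInsertSorted c fs).Pairwise (· ≤ ·) := by
  rw [pvIns_eq_orderedInsert]
  exact List.Pairwise.orderedInsert c fs h

theorem pvIns_comm (s t : String) (fs : List String) (h : fs.Pairwise (· ≤ ·)) :
    pvInsertSorted s (pvInsertSorted t fs) = pvInsertSorted t (pvInsertSorted s fs) := by
  apply List.Perm.eq_of_pairwise (le := (· ≤ ·))
  · intro a b _ _ hab hba; exact le_antisymm hab hba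
  · exact pvIns_pairwise _ _ (pvIns_pairwise _ _ h)
  · exact pvIns_pairwise _ _ (pvIns_pairwise _ _ h)
  · exact ((((pvIns_perm s (pvInsertSorted t fs)).trans ((pvIns_perm t fs).cons s)).trans
      (List.Perm.swap t s fs)).trans (((pvIns_perm s fs).cons t).symm)).trans
      (pvIns_perm t (pvInsertSorted s fs)).symm

theorem pvJ_ins_single (c : Char) (fs : List String) :
    pvJ (pvInsertSorted (String.ofList [c]) fs)
      = pvJ (fs.takeWhile (fun f => f < String.ofList [c]))
        ++ c :: pvJ (fs.dropWhile (fun f => f < String.ofList [c])) := by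
  rw [pvIns_decomp, pvJ_append, pvJ_cons]
  simp

theorem pvJ_ins_length (c : Char) (fs : List String) :
    (pvJ (pvInsertSorted (String.ofList [c]) fs)).length = (pvJ fs).length + 1 := by
  rw [pvJ_ins_single]
  conv_rhs => rw [← List.takeWhile_append_dropWhile (p := fun f => f < String.ofList [c]) (l := fs)]
  rw [pvJ_append]
  simp; omega

-- ---- extraction: the character at the first mismatch is the inserted one ----

theorem pvExtract_single (c : Char) (fs : List String) (w base : List Char) (d : Char)
    (hw : w = pvJ (pvInsertSorted (String.ofList [c]) fs))
    (hb : base = pvJ fs) :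
    w.getD (pvCpl w base) d = c := by
  subst hw hb
  rw [pvJ_ins_single]
  conv in pvCpl _ (pvJ fs) =>
    rw [show pvJ fs = pvJ (fs.takeWhile (fun f => f < String.ofList [c]))
        ++ pvJ (fs.dropWhile (fun f => f < String.ofList [c])) by
      rw [← pvJ_append, List.takeWhile_append_dropWhile]]
  rw [pvCpl_append]
  rw [List.getD_append_right _ _ _ _ (by omega)]
  simp only [Nat.add_sub_cancel_left]
  exact pvCpl_single _ _ _

theorem pvTakeWhile_append_stop (p : String → Bool) (l1 : List String) (x : String) (l2 : List String)
    (h : p x = false) :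
    (l1 ++ x :: l2).takeWhile p = l1.takeWhile p ∧ (l1 ++ x :: l2).dropWhile p = l1.dropWhile p ++ x :: l2 := by
  induction l1 with
  | nil => simp [h]
  | cons f l ih =>
    by_cases hf : p f
    · simpa [List.takeWhile_cons, List.dropWhile_cons, hf] using ih
    · simp [hf]

-- inserting two single-letter strings a ≤ b splits fs into three blocks
theorem pvIns2_decomp (a b : Char) (fs : List String)
    (hab : String.ofList [a] ≤ String.ofList [b]) :
    ∃ F1 F2 F3 : List String,
      fs = F1 ++ F2 ++ F3 ∧
      pvInsertSorted (String.ofList [a]) (pvInsertSorted (String.ofList [b]) fs)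
        = F1 ++ String.ofList [a] :: (F2 ++ String.ofList [b] :: F3) := by
  set sa := String.ofList [a]
  set sb := String.ofList [b]
  have hstop : (decide (sb < sa)) = false := by simp [not_lt.mpr hab]
  set tw := fs.takeWhile (fun f => f < sb) with htw
  set dw := fs.dropWhile (fun f => f < sb) with hdw
  refine ⟨tw.takeWhile (fun f => f < sa), tw.dropWhile (fun f => f < sa), dw, ?_, ?_⟩
  · rw [List.takeWhile_append_dropWhile, htw, hdw, List.takeWhile_append_dropWhile]
  · rw [pvIns_decomp sb fs, pvIns_decomp sa]
    have := pvTakeWhile_append_stop (fun f => decide (f < sa)) tw sb dw hstop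
    rw [this.1, this.2]

theorem pvExtract_double (a b : Char) (fs : List String) (w base : List Char) (d : Char)
    (hab : String.ofList [a] ≤ String.ofList [b])
    (hw : w = pvJ (pvInsertSorted (String.ofList [a]) (pvInsertSorted (String.ofList [b]) fs)))
    (hb : base = pvJ fs) :
    w.getD (pvCpl w base) d = a ∨ w.getD (pvCpl w base) d = b := by
  obtain ⟨F1, F2, F3, hfs, hins⟩ := pvIns2_decomp a b fs hab
  subst hw hb
  rw [hins, hfs]
  have h1 : pvJ (F1 ++ String.ofList [a] :: (F2 ++ String.ofList [b] :: F3))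
      = pvJ F1 ++ (a :: (pvJ F2 ++ b :: pvJ F3)) := by simp [pvJ]
  have h2 : pvJ (F1 ++ F2 ++ F3) = pvJ F1 ++ (pvJ F2 ++ pvJ F3) := by simp [pvJ]
  rw [h1, h2, pvCpl_append]
  rw [List.getD_append_right _ _ _ _ (by omega)]
  simp only [Nat.add_sub_cancel_left]
  exact pvCpl_double ((pvJ F2).length + (pvJ F3).length) _ _ _ _ _ (by simp)

-- ---- B's per-word test as a predicate, and the loop-shape plumbing ----

def pvB (wild : Int) (fixed : List String) (base w : String) : Bool :=
  if PySem.Str.len w != PySem.Str.len base + wild then false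
  else match (PySem.List.pyRange 0 wild 1).foldl (fun st _ => pvMatchStep w st) (some (base, fixed)) with
    | none => false
    | some (cur, _) => w == cur

theorem pvBody_eq (wild : Int) (fixed : List String) (base : String) :
    (fun (result : List String) (w : String) =>
      if PySem.Str.len w != PySem.Str.len base + wild then result
      else match (PySem.List.pyRange 0 wild 1).foldl (fun st _ => pvMatchStep w st) (some (base, fixed)) with
        | none => result
        | some (cur, _) => if w == cur then PySem.Set.add result w else result)
      = (fun result w => if pvB wild fixed base w then PySem.Set.add result w else result) := by
  funext r w
  unfold pvB
  cases hg : (PySem.Str.len w != PySem.Str.len base + wild) with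
  | true => simp
  | false =>
    simp only [Bool.false_eq_true, if_false]
    rcases hst : (PySem.List.pyRange 0 wild 1).foldl (fun st _ => pvMatchStep w st) (some (base, fixed)) with _ | ⟨cur, cand⟩
    · simp
    · by_cases hw : (w == cur) = true <;> simp [hw]

theorem pvFoldl_filter (p : String → Bool) :
    ∀ (ws acc : List String), ws.Nodup → (∀ w ∈ ws, w ∉ acc) →
    ws.foldl (fun r w => if p w then PySem.Set.add r w else r) acc = acc ++ ws.filter p := by
  intro ws
  induction ws with
  | nil => intro acc _ _; simp
  | cons w ws ih =>
    intro acc hnd hdis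
    have hwacc : w ∉ acc := hdis w (by simp)
    have hadd : PySem.Set.add acc w = acc ++ [w] := by
      simp [PySem.Set.add, PySem.Set.contains, hwacc]
    simp only [List.foldl_cons, List.filter_cons]
    by_cases hp : p w = true
    · rw [if_pos hp, if_pos hp, hadd,
        ih (acc ++ [w]) (List.Nodup.of_cons hnd) ?_]
      · simp
      · intro x hx
        simp only [List.mem_append, List.mem_singleton]
        rintro (h | rfl)
        · exact hdis x (by simp [hx]) h
        · exact (List.nodup_cons.mp hnd).1 hx
    · rw [if_neg (by simp [hp]), if_neg (by simp [hp]),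
        ih acc (List.Nodup.of_cons hnd) (fun x hx => hdis x (by simp [hx]))]

theorem pvMem_foldl_update (g : String → List String) (L : List String) :
    ∀ (acc : PySem.Set String) (w : String),
    w ∈ L.foldl (fun s l1 => PySem.Set.update s (g l1)) acc ↔ w ∈ acc ∨ ∃ l1 ∈ L, w ∈ g l1 := by
  induction L with
  | nil => simp
  | cons l L ih =>
    intro acc w
    simp only [List.foldl_cons, ih, PySem.Set.mem_update]
    constructor
    · rintro ((h | h) | ⟨l1, h1, h2⟩)
      · exact Or.inl h
      · exact Or.inr ⟨l, by simp, h⟩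
      · exact Or.inr ⟨l1, by simp [h1], h2⟩
    · rintro (h | ⟨l1, h1, h2⟩)
      · exact Or.inl (Or.inl h)
      · rcases List.mem_cons.mp h1 with rfl | h1
        · exact Or.inl (Or.inr h2)
        · exact Or.inr ⟨l1, h1, h2⟩

-- ---- sorting a list with one or two extra letters = ordered insertion ----

theorem pvSorted_cons2 (x y : String) (fs : List String) (h : fs.Pairwise (· ≤ ·)) :
    PySem.List.sorted (x :: y :: fs) (fun s => s) = pvInsertSorted x (pvInsertSorted y fs) := by
  apply PySem.List.sorted_id_eq_of_perm_of_pairwise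
  · exact (pvIns_perm x _).trans ((pvIns_perm y fs).cons x)
  · exact pvIns_pairwise _ _ (pvIns_pairwise _ _ h)

theorem pvSorted_cons (x : String) (fs : List String) (h : fs.Pairwise (· ≤ ·)) :
    PySem.List.sorted (x :: fs) (fun s => s) = pvInsertSorted x fs := by
  apply PySem.List.sorted_id_eq_of_perm_of_pairwise
  · exact pvIns_perm x fs
  · exact pvIns_pairwise _ _ h

theorem pvAlphabet_eq : pvAlphabet = pvAlphabetChars.map (fun c => String.ofList [c]) := by rfl

theorem pvMatchStep_some (w cur : String) (cand : List String) :
    pvMatchStep w (some (cur, cand)) =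
      (if pvAlphabetChars.contains (w.toList.getD (pvCpl w.toList cur.toList) 'A') then
        some (PySem.Str.join "" (pvInsertSorted (String.ofList [w.toList.getD (pvCpl w.toList cur.toList) 'A']) cand),
              pvInsertSorted (String.ofList [w.toList.getD (pvCpl w.toList cur.toList) 'A']) cand)
      else none) := rfl

-- ---- B's test agrees with A's candidate set, branch by branch ----

theorem pvBranch0 (fs : List String) (w : String) :
    pvB 0 fs (PySem.Str.join "" fs) w = (w == PySem.Str.join "" fs) := by
  have hrange : PySem.List.pyRange 0 0 1 = [] := by decide
  unfold pvB
  rw [hrange]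
  simp only [List.foldl_nil]
  by_cases hwb : w = PySem.Str.join "" fs
  · subst hwb
    simp
  · have : (w == PySem.Str.join "" fs) = false := by simp [hwb]
    rw [this]
    split <;> simp

theorem pvBranch2_aux (fixed : List String) (hsf : fixed.Pairwise (· ≤ ·)) (w : String)
    (a b : Char) (ha : a ∈ pvAlphabetChars) (hb : b ∈ pvAlphabetChars)
    (hab : String.ofList [a] ≤ String.ofList [b])
    (hw : w = PySem.Str.join "" (pvInsertSorted (String.ofList [a]) (pvInsertSorted (String.ofList [b]) fixed))) :
    pvB 2 fixed (PySem.Str.join "" fixed) w = true := by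
  have hrange : PySem.List.pyRange 0 2 1 = [0, 1] := by decide
  set base := PySem.Str.join "" fixed with hbase
  have hbtl : base.toList = pvJ fixed := pvJoin_toList fixed
  have hwtl : w.toList = pvJ (pvInsertSorted (String.ofList [a]) (pvInsertSorted (String.ofList [b]) fixed)) := by
    rw [hw, pvJoin_toList]
  have hlen : w.toList.length = base.toList.length + 2 := by
    rw [hwtl, hbtl, pvJ_ins_length, pvJ_ins_length]
  have hguard : (PySem.Str.len w != PySem.Str.len base + 2) = false := by
    simp [PySem.Str.len_eq, hlen]
  unfold pvB
  rw [hrange]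
  simp only [List.foldl_cons, List.foldl_nil]
  rw [hguard]
  simp only [Bool.false_eq_true, if_false]
  have hc1v : w.toList.getD (pvCpl w.toList base.toList) 'A' = a ∨
      w.toList.getD (pvCpl w.toList base.toList) 'A' = b :=
    pvExtract_double a b fixed _ _ 'A' hab hwtl hbtl
  rcases hc1v with hc1 | hc1
  · -- first extracted char is a
    have hcont1 : pvAlphabetChars.contains (w.toList.getD (pvCpl w.toList base.toList) 'A') = true := by
      rw [hc1, List.contains_iff_mem]; exact ha
    rw [pvMatchStep_some, if_pos hcont1, hc1]
    set cand1 := pvInsertSorted (String.ofList [a]) fixed with hcand1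
    have hw2 : w.toList = pvJ (pvInsertSorted (String.ofList [b]) cand1) := by
      rw [hwtl, hcand1, pvIns_comm _ _ _ hsf]
    have hc2 : w.toList.getD (pvCpl w.toList (PySem.Str.join "" cand1).toList) 'A' = b :=
      pvExtract_single b cand1 _ _ 'A' hw2 (pvJoin_toList cand1)
    have hcont2 : pvAlphabetChars.contains
        (w.toList.getD (pvCpl w.toList (PySem.Str.join "" cand1).toList) 'A') = true := by
      rw [hc2, List.contains_iff_mem]; exact hb
    rw [pvMatchStep_some, if_pos hcont2, hc2]
    have : w = PySem.Str.join "" (pvInsertSorted (String.ofList [b]) cand1) := by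
      apply String.toList_inj.mp
      rw [hw2, pvJoin_toList]
    simp [← this]
  · -- first extracted char is b
    have hcont1 : pvAlphabetChars.contains (w.toList.getD (pvCpl w.toList base.toList) 'A') = true := by
      rw [hc1, List.contains_iff_mem]; exact hb
    rw [pvMatchStep_some, if_pos hcont1, hc1]
    set cand1 := pvInsertSorted (String.ofList [b]) fixed with hcand1
    have hw2 : w.toList = pvJ (pvInsertSorted (String.ofList [a]) cand1) := by
      rw [hwtl, hcand1]
    have hc2 : w.toList.getD (pvCpl w.toList (PySem.Str.join "" cand1).toList) 'A' = a :=
      pvExtract_single a cand1 _ _ 'A' hw2 (pvJoin_toList cand1)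
    have hcont2 : pvAlphabetChars.contains
        (w.toList.getD (pvCpl w.toList (PySem.Str.join "" cand1).toList) 'A') = true := by
      rw [hc2, List.contains_iff_mem]; exact ha
    rw [pvMatchStep_some, if_pos hcont2, hc2]
    have : w = PySem.Str.join "" (pvInsertSorted (String.ofList [a]) cand1) := by
      apply String.toList_inj.mp
      rw [hw2, pvJoin_toList]
    simp [← this]

theorem pvBranch2 (fixed : List String) (hsf : fixed.Pairwise (· ≤ ·)) (w : String) :
    pvB 2 fixed (PySem.Str.join "" fixed) w = true ↔
    ∃ l1 ∈ pvAlphabet, ∃ l2 ∈ pvAlphabet,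
      w = PySem.Str.join "" (PySem.List.sorted (l1 :: l2 :: fixed) (fun x => x)) := by
  constructor
  · intro h
    have hrange : PySem.List.pyRange 0 2 1 = [0, 1] := by decide
    unfold pvB at h
    rw [hrange] at h
    simp only [List.foldl_cons, List.foldl_nil] at h
    by_cases hg : (PySem.Str.len w != PySem.Str.len (PySem.Str.join "" fixed) + 2) = true
    · rw [if_pos hg] at h; exact absurd h (by simp)
    · rw [if_neg hg] at h
      rw [pvMatchStep_some] at h
      set c1 := w.toList.getD (pvCpl w.toList (PySem.Str.join "" fixed).toList) 'A' with hc1def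
      by_cases hc1 : pvAlphabetChars.contains c1 = true
      · rw [if_pos hc1] at h
        set cand1 := pvInsertSorted (String.ofList [c1]) fixed with hcand1
        rw [pvMatchStep_some] at h
        set c2 := w.toList.getD (pvCpl w.toList (PySem.Str.join "" cand1).toList) 'A' with hc2def
        by_cases hc2 : pvAlphabetChars.contains c2 = true
        · rw [if_pos hc2] at h
          simp only [beq_iff_eq] at h
          refine ⟨String.ofList [c2], ?_, String.ofList [c1], ?_, ?_⟩
          · rw [pvAlphabet_eq]
            exact List.mem_map_of_mem (List.contains_iff_mem.mp hc2)
          · rw [pvAlphabet_eq]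
            exact List.mem_map_of_mem (List.contains_iff_mem.mp hc1)
          · rw [pvSorted_cons2 _ _ _ hsf, ← hcand1]
            exact h
        · rw [if_neg hc2] at h; exact absurd h (by simp)
      · rw [if_neg hc1] at h
        simp only [pvMatchStep] at h
        exact absurd h (by simp)
  · rintro ⟨l1, hl1, l2, hl2, hw⟩
    rw [pvAlphabet_eq] at hl1 hl2
    obtain ⟨a, ha, rfl⟩ := List.mem_map.mp hl1
    obtain ⟨b, hb, rfl⟩ := List.mem_map.mp hl2
    rw [pvSorted_cons2 _ _ _ hsf] at hw
    rcases le_total (String.ofList [a]) (String.ofList [b]) with hab | hba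
    · exact pvBranch2_aux fixed hsf w a b ha hb hab hw
    · exact pvBranch2_aux fixed hsf w b a hb ha hba (by rw [hw, pvIns_comm _ _ _ hsf])

theorem pvBranch1 (fixed : List String) (hsf : fixed.Pairwise (· ≤ ·)) (w : String) :
    pvB 1 fixed (PySem.Str.join "" fixed) w = true ↔
    ∃ l1 ∈ pvAlphabet,
      w = PySem.Str.join "" (PySem.List.sorted (l1 :: fixed) (fun x => x)) := by
  have hrange : PySem.List.pyRange 0 1 1 = [0] := by decide
  constructor
  · intro h
    unfold pvB at h
    rw [hrange] at h
    simp only [List.foldl_cons, List.foldl_nil] at h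
    by_cases hg : (PySem.Str.len w != PySem.Str.len (PySem.Str.join "" fixed) + 1) = true
    · rw [if_pos hg] at h; exact absurd h (by simp)
    · rw [if_neg hg] at h
      rw [pvMatchStep_some] at h
      set c1 := w.toList.getD (pvCpl w.toList (PySem.Str.join "" fixed).toList) 'A' with hc1def
      by_cases hc1 : pvAlphabetChars.contains c1 = true
      · rw [if_pos hc1] at h
        simp only [beq_iff_eq] at h
        refine ⟨String.ofList [c1], ?_, ?_⟩
        · rw [pvAlphabet_eq]
          exact List.mem_map_of_mem (List.contains_iff_mem.mp hc1)
        · rw [pvSorted_cons _ _ hsf]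
          exact h
      · rw [if_neg hc1] at h; exact absurd h (by simp)
  · rintro ⟨l1, hl1, hw⟩
    rw [pvAlphabet_eq] at hl1
    obtain ⟨a, ha, rfl⟩ := List.mem_map.mp hl1
    rw [pvSorted_cons _ _ hsf] at hw
    set base := PySem.Str.join "" fixed with hbase
    have hbtl : base.toList = pvJ fixed := pvJoin_toList fixed
    have hwtl : w.toList = pvJ (pvInsertSorted (String.ofList [a]) fixed) := by
      rw [hw, pvJoin_toList]
    have hlen : w.toList.length = base.toList.length + 1 := by
      rw [hwtl, hbtl, pvJ_ins_length]
    have hguard : (PySem.Str.len w != PySem.Str.len base + 1) = false := by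
      simp [PySem.Str.len_eq, hlen]
    unfold pvB
    rw [hrange]
    simp only [List.foldl_cons, List.foldl_nil]
    rw [hguard]
    simp only [Bool.false_eq_true, if_false]
    have hc1 : w.toList.getD (pvCpl w.toList base.toList) 'A' = a :=
      pvExtract_single a fixed _ _ 'A' hwtl hbtl
    have hcont1 : pvAlphabetChars.contains (w.toList.getD (pvCpl w.toList base.toList) 'A') = true := by
      rw [hc1, List.contains_iff_mem]; exact ha
    rw [pvMatchStep_some, if_pos hcont1, hc1]
    simp [← hw]

-- ===== VERDICT (by name: the statement is the Claim_ definition above) =====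
theorem doTheseLettersFormAWord_spec : Claim_equal_doTheseLettersFormAWord := by
  intro letters words _ hpre
  obtain ⟨hlen2, hnodup⟩ := hpre
  unfold Spec_doTheseLettersFormAWord
  unfold doTheseLettersFormAWord doTheseLettersFormAWord_alt
  set ls := PySem.List.sorted letters (fun x : String => x) with hls
  have hsls : ls.Pairwise (· ≤ ·) := PySem.List.sorted_pairwise letters _
  by_cases h1 : (PySem.List.pyGetD ls 1 "" == ".") = true
  · simp only [h1, reduceIte]
    set fixed := PySem.List.slice ls (some 2) with hfixed
    have hsf : fixed.Pairwise (· ≤ ·) := by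
      rw [hfixed, PySem.List.slice_from ls (by norm_num)]
      exact List.Pairwise.sublist (List.drop_sublist _ _) hsls
    set base := PySem.Str.join "" fixed with hbase
    rw [pvBody_eq 2 fixed base]
    rw [pvFoldl_filter (pvB 2 fixed base) words PySem.Set.empty hnodup (by intro w _; simp [PySem.Set.empty])]
    rw [show (PySem.Set.empty : List String) ++ words.filter (pvB 2 fixed base) = words.filter (pvB 2 fixed base) from by simp [PySem.Set.empty]]
    apply List.filter_congr
    intro w hw
    have hmem : (PySem.Set.ofList (pvAlphabet.foldl (fun s l1 =>
        pvAlphabet.foldl (fun s l2 =>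
          PySem.Set.add s (PySem.Str.join ""
            (PySem.List.sorted ([l1] ++ [l2] ++ fixed) (fun x => x)))) s)
        PySem.Set.empty)).contains w = true ↔
        ∃ l1 ∈ pvAlphabet, ∃ l2 ∈ pvAlphabet,
          w = PySem.Str.join "" (PySem.List.sorted (l1 :: l2 :: fixed) (fun x => x)) := by
      rw [PySem.Set.contains, List.contains_iff_mem, PySem.Set.mem_ofList]
      have hfold : (pvAlphabet.foldl (fun s l1 =>
          pvAlphabet.foldl (fun s l2 =>
            PySem.Set.add s (PySem.Str.join ""
              (PySem.List.sorted ([l1] ++ [l2] ++ fixed) (fun x => x)))) s)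
          PySem.Set.empty)
          = pvAlphabet.foldl (fun s l1 => PySem.Set.update s
              (pvAlphabet.map (fun l2 => PySem.Str.join ""
                (PySem.List.sorted (l1 :: l2 :: fixed) (fun x => x))))) PySem.Set.empty := by
        apply List.foldl_ext
        intro s l1 _
        rw [PySem.Set.update_map_eq_foldl_add]
        rfl
      rw [hfold, pvMem_foldl_update]
      simp only [PySem.Set.empty, List.not_mem_nil, false_or, List.mem_map]
      constructor
      · rintro ⟨l1, hl1, l2, hl2, rfl⟩
        exact ⟨l1, hl1, l2, hl2, rfl⟩
      · rintro ⟨l1, hl1, l2, hl2, rfl⟩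
        exact ⟨l1, hl1, l2, hl2, rfl⟩
    rw [Bool.eq_iff_iff]
    rw [hmem, pvBranch2 fixed hsf w]
  · have h1' : (PySem.List.pyGetD ls 1 "" == ".") = false := by
      simpa using h1
    simp only [h1', Bool.false_eq_true, reduceIte]
    by_cases h2 : (PySem.List.pyGetD ls 0 "" == ".") = true
    · simp only [h2, reduceIte]
      set fixed := PySem.List.slice ls (some 1) with hfixed
      have hsf : fixed.Pairwise (· ≤ ·) := by
        rw [hfixed, PySem.List.slice_from ls (by norm_num)]
        exact List.Pairwise.sublist (List.drop_sublist _ _) hsls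
      set base := PySem.Str.join "" fixed with hbase
      rw [pvBody_eq 1 fixed base]
      rw [pvFoldl_filter (pvB 1 fixed base) words PySem.Set.empty hnodup (by intro w _; simp [PySem.Set.empty])]
      rw [show (PySem.Set.empty : List String) ++ words.filter (pvB 1 fixed base) = words.filter (pvB 1 fixed base) from by simp [PySem.Set.empty]]
      apply List.filter_congr
      intro w hw
      have hmem : (PySem.Set.ofList (pvAlphabet.foldl (fun s l1 =>
          PySem.Set.add s (PySem.Str.join ""
            (PySem.List.sorted ([l1] ++ fixed) (fun x => x)))) PySem.Set.empty)).contains w = true ↔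
          ∃ l1 ∈ pvAlphabet,
            w = PySem.Str.join "" (PySem.List.sorted (l1 :: fixed) (fun x => x)) := by
        rw [PySem.Set.contains, List.contains_iff_mem, PySem.Set.mem_ofList]
        rw [show (pvAlphabet.foldl (fun s l1 =>
            PySem.Set.add s (PySem.Str.join ""
              (PySem.List.sorted ([l1] ++ fixed) (fun x => x)))) PySem.Set.empty)
            = PySem.Set.update PySem.Set.empty
              (pvAlphabet.map (fun l1 => PySem.Str.join ""
                (PySem.List.sorted (l1 :: fixed) (fun x => x)))) from by
          rw [PySem.Set.update_map_eq_foldl_add]; rfl]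
        rw [PySem.Set.mem_update]
        simp only [PySem.Set.empty, List.not_mem_nil, false_or, List.mem_map]
        constructor
        · rintro ⟨l1, hl1, rfl⟩
          exact ⟨l1, hl1, rfl⟩
        · rintro ⟨l1, hl1, rfl⟩
          exact ⟨l1, hl1, rfl⟩
      rw [Bool.eq_iff_iff]
      rw [hmem, pvBranch1 fixed hsf w]
    · have h2' : (PySem.List.pyGetD ls 0 "" == ".") = false := by
        simpa using h2
      simp only [h2', Bool.false_eq_true, reduceIte]
      rw [pvBody_eq 0 ls (PySem.Str.join "" ls)]
      rw [pvFoldl_filter (pvB 0 ls (PySem.Str.join "" ls)) words PySem.Set.empty hnodup (by intro w _; simp [PySem.Set.empty])]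
      rw [show (PySem.Set.empty : List String) ++ words.filter (pvB 0 ls (PySem.Str.join "" ls)) = words.filter (pvB 0 ls (PySem.Str.join "" ls)) from by simp [PySem.Set.empty]]
      apply List.filter_congr
      intro w hw
      rw [pvBranch0 ls w]
      rw [Bool.eq_iff_iff]
      constructor
      · intro hc
        rw [PySem.Set.contains, List.contains_iff_mem, PySem.Set.mem_ofList] at hc
        simp only [List.mem_singleton] at hc
        simp [hc]
      · intro hc
        rw [beq_iff_eq] at hc
        rw [PySem.Set.contains, List.contains_iff_mem, PySem.Set.mem_ofList]
        simp [hc]
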